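-- pv_equiv track=rewrite | github.com/x2yline/bioinfo_tools | kegg_animation/kegg_gif.py | parse_entitys_dict
-- ===== SOURCE A (Python) =====
-- def parse_entitys_dict(entities):
--     entity_graphic_dict = {}
--     graphic_entity_dict = {}
--     for (entity_id, entity_type, graphic_element) in entities:
--         entity_graphic_dict\
--             .setdefault((entity_id, entity_type),[])\
--             .append(graphic_element)
--         #graphic_entity_dict\
--             #.setdefault(graphic_element,[])\
--             #.append((entity_id, entity_type))
--     return(entity_graphic_dict)#, graphic_entity_dict)
-- ===== SOURCE B (Python) =====
-- def parse_entitys_dict(entities):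
--     # Two-pass decomposition: first collect the distinct (id, type) keys in
--     # first-occurrence order, then build each group with one filtering pass.
--     entities = list(entities)
--     keys = dict.fromkeys((entity_id, entity_type)
--                          for (entity_id, entity_type, _g) in entities)
--     return {key: [g for (i, t, g) in entities if (i, t) == key]
--             for key in keys}
-- ===== Notes on version B (the rewrite author's own statement) =====
-- stated objective: alternative
-- what changed: Replaces A's single incremental setdefault-append dict loop by a two-pass decomposition: an ordered dedup of the (entity_id, entity_type) keys followed by one filtering comprehension per key.
import Mathlib
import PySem

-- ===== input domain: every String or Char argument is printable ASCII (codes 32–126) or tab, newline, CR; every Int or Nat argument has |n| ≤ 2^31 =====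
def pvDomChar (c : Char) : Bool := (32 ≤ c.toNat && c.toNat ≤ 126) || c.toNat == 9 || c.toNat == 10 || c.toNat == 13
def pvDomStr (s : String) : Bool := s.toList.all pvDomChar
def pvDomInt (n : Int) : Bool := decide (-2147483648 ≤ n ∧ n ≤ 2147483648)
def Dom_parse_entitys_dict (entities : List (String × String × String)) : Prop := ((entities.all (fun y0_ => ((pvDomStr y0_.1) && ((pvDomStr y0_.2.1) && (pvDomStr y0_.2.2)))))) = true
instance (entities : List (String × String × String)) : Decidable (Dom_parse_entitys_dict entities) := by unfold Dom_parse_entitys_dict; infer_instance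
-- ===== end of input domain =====

-- B replaces A's incremental setdefault/append dict loop by a two-pass decomposition
-- (ordered key dedup, then one filtering pass per key); objective: alternative, not faster.

-- ===== PORT A =====
-- the loop: entity_graphic_dict.setdefault((entity_id, entity_type), []).append(graphic_element)
-- i.e. d[(id, ty)] = d.get((id, ty), []) + [g]  =  Dict.modify (id, ty) [] (· ++ [g]);
-- (the unused, commented-out graphic_entity_dict is omitted); the returned dict is its
-- items list, reassociated to the required List (String × String × List String).
def parse_entitys_dict (entities : List (String × String × String)) : List (String × String × List String) :=
  (entities.foldl
      (fun (d : PySem.Dict (String × String) (List String)) e =>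
        d.modify (e.1, e.2.1) [] (fun l => l ++ [e.2.2]))
      PySem.Dict.empty).items.map (fun p => (p.1.1, p.1.2, p.2))

-- ===== PORT B =====
-- dict.fromkeys over the key projection is the ordered dedup PySem.List.dedup;
-- the dict comprehension pairs each key with one filtering pass over entities.
def parse_entitys_dict_alt (entities : List (String × String × String)) : List (String × String × List String) :=
  (PySem.List.dedup (entities.map (fun e => (e.1, e.2.1)))).map (fun k =>
    (k.1, k.2, (entities.filter (fun e => (e.1, e.2.1) == k)).map (fun e => e.2.2)))

-- ===== PRECONDITION & SPEC =====
def Spec_parse_entitys_dict (entities : List (String × String × String)) (out : List (String × String × List String)) : Prop := out = parse_entitys_dict_alt entities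
instance (entities : List (String × String × String)) (out : List (String × String × List String)) : Decidable (Spec_parse_entitys_dict entities out) := by unfold Spec_parse_entitys_dict; infer_instance

-- ===== CLAIM (what is proved, stated in full; the proofs are below) =====
def Claim_equal_parse_entitys_dict : Prop := ∀ (entities : List (String × String × String)), Dom_parse_entitys_dict entities → Spec_parse_entitys_dict entities (parse_entitys_dict entities)

-- ===== LEMMAS AND PROOFS =====

-- A's loop over triples is the standard grouping fold over the (key, value) pairs.
theorem foldA_eq_pairs (entities : List (String × String × String)) :
    entities.foldl
      (fun (d : PySem.Dict (String × String) (List String)) e =>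
        d.modify (e.1, e.2.1) [] (fun l => l ++ [e.2.2]))
      PySem.Dict.empty
    = (entities.map (fun e => ((e.1, e.2.1), e.2.2))).foldl
        (fun d p => d.modify p.1 [] (fun l => l ++ [p.2])) PySem.Dict.empty := by
  rw [List.foldl_map]

theorem keysA (entities : List (String × String × String)) :
    (entities.foldl
      (fun (d : PySem.Dict (String × String) (List String)) e =>
        d.modify (e.1, e.2.1) [] (fun l => l ++ [e.2.2]))
      PySem.Dict.empty).keys
    = PySem.List.dedup (entities.map (fun e => (e.1, e.2.1))) := by
  rw [PySem.Dict.keys_foldl_modify_key]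
  simp [PySem.Dict.keys_empty, PySem.Set.update_nil_left]

theorem nodup_keysA (entities : List (String × String × String)) :
    (entities.foldl
      (fun (d : PySem.Dict (String × String) (List String)) e =>
        d.modify (e.1, e.2.1) [] (fun l => l ++ [e.2.2]))
      PySem.Dict.empty).keys.Nodup := by
  rw [keysA]; exact PySem.List.nodup_dedup _

theorem getDA (entities : List (String × String × String)) (k : String × String) :
    (entities.foldl
      (fun (d : PySem.Dict (String × String) (List String)) e =>
        d.modify (e.1, e.2.1) [] (fun l => l ++ [e.2.2]))
      PySem.Dict.empty).getD k []
    = (entities.filter (fun e => (e.1, e.2.1) == k)).map (fun e => e.2.2) := by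
  rw [foldA_eq_pairs, PySem.Dict.getD_foldl_modify_append]
  simp [List.filter_map, Function.comp_def]

-- ===== VERDICT (by name: the statement is the Claim_ definition above) =====
theorem parse_entitys_dict_spec : Claim_equal_parse_entitys_dict := by
  intro entities _
  show _ = _
  unfold parse_entitys_dict parse_entitys_dict_alt
  rw [PySem.Dict.items_eq_map_keys _ (nodup_keysA entities) [], keysA, List.map_map]
  refine List.map_congr_left (fun k _ => ?_)
  simp [getDA]
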